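-- pv_equiv track=rewrite | github.com/otterchung/Advent-of-Code | AOC2023/Day 14 P2.py | rollStones
-- ===== SOURCE A (Python) =====
-- def rollStones(map):
--     newMap = []
--
--     for line in map:
--         line += "#"
--         rollLine = []
--
--         i = 0
--         prev_i = 0
--         y = line.count("#")
--         for a in range(0, y):
--             # ....# ""#
--             i = line.index("#", i) + 1
--
--             smallRange = line[prev_i:i]
--             ohs = smallRange.count("O")
--
--             rollLine += ["O"] * ohs + ["."] * (len(smallRange) - ohs - 1) + ["#"]
--             prev_i = i
--         newMap.append(rollLine[:-1])
--
--     return newMap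
-- ===== SOURCE B (Python) =====
-- def rollStones(map):
--     # Single left-to-right pass per line with two counters (stones / gaps seen
--     # since the last '#'), flushed at each '#' and at end of line.
--     result = []
--     for line in map:
--         out = []
--         o = 0
--         d = 0
--         for ch in line:
--             if ch == "#":
--                 out += ["O"] * o + ["."] * d + ["#"]
--                 o = 0
--                 d = 0
--             elif ch == "O":
--                 o += 1
--             else:
--                 d += 1
--         out += ["O"] * o + ["."] * d
--         result.append(out)
--     return result
-- ===== Notes on version B (the rewrite author's own statement) =====
-- stated objective: faster
-- what changed: Replaces A's count-driven loop of repeated line.index('#') scans with slice copies and per-segment recounts by a single left-to-right pass per line that keeps two counters (stones and gaps since the last '#') and flushes them at each '#' and at end of line.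
import Mathlib
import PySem

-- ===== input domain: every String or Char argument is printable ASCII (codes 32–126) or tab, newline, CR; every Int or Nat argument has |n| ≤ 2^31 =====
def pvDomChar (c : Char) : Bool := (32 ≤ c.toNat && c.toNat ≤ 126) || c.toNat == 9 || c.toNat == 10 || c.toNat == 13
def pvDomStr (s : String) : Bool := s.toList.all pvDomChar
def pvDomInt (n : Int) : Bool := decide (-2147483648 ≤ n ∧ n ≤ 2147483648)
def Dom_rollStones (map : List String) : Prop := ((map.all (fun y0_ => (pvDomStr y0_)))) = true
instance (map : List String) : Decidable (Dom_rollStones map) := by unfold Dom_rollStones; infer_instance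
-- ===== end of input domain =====

-- B replaces A's count/index-scan/slice-and-recount loop by a single left-to-right pass per
-- line keeping two counters; same return value on every input (measured constant-factor faster).

-- ===== PORT A =====
-- Literal port of A. Exactness notes: line.index('#', i) is PySem.Chars.findFrom (it never fails
-- here because the scanned string ends with '#', so the Python never raises); Python's
-- ["."] * (len(smallRange) - ohs - 1) is empty for a negative factor, which coincides with
-- List.replicate under Nat (clamped) subtraction because ohs ≤ len(smallRange).
def rollStones (map : List String) : List (List String) :=
  map.foldl (fun newMap line =>
    let l := line.toList ++ ['#']
    let y := PySem.Chars.count l ['#']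
    let res := (PySem.List.pyRange 0 (y : Int) 1).foldl
      (fun (st : Int × Int × List String) _ =>
        let i' := PySem.Chars.findFrom l ['#'] st.1 none + 1
        let smallRange := PySem.Chars.slice l (some st.2.1) (some i')
        let ohs := PySem.Chars.count smallRange ['O']
        (i', i',
          st.2.2 ++ List.replicate ohs "O"
                 ++ List.replicate (smallRange.length - ohs - 1) "." ++ ["#"]))
      ((0 : Int), (0 : Int), ([] : List String))
    newMap ++ [PySem.List.slice res.2.2 none (some (-1))]) []

-- ===== PORT B =====
def rollStones_alt (map : List String) : List (List String) :=
  map.foldl (fun result line =>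
    let st := line.toList.foldl
      (fun (st : List String × Nat × Nat) ch =>
        if ch = '#' then
          (st.1 ++ List.replicate st.2.1 "O" ++ List.replicate st.2.2 "." ++ ["#"], 0, 0)
        else if ch = 'O' then (st.1, st.2.1 + 1, st.2.2)
        else (st.1, st.2.1, st.2.2 + 1))
      (([] : List String), (0 : Nat), (0 : Nat))
    result ++ [st.1 ++ List.replicate st.2.1 "O" ++ List.replicate st.2.2 "."]) []

-- ===== PRECONDITION & SPEC =====
def Spec_rollStones (map : List String) (out : List (List String)) : Prop := out = rollStones_alt map
instance (map : List String) (out : List (List String)) : Decidable (Spec_rollStones map out) := by unfold Spec_rollStones; infer_instance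

-- ===== CLAIM (what is proved, stated in full; the proofs are below) =====
def Claim_equal_rollStones : Prop := ∀ (map : List String), Dom_rollStones map → Spec_rollStones map (rollStones map)

-- ===== LEMMAS AND PROOFS =====

-- PySem.Chars.count for a one-character needle is List.count
theorem pvCountGo (c : Char) : ∀ (s : List Char) (acc : Nat),
    PySem.Chars.count.go [c] s.length s acc = acc + s.count c := by
  intro s
  induction s with
  | nil => intro acc; simp [PySem.Chars.count.go]
  | cons h t ih =>
      intro acc
      by_cases hc : c = h
      · subst hc
        simp [PySem.Chars.count.go, List.isPrefixOf, ih]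
        omega
      · simp [PySem.Chars.count.go, List.isPrefixOf, hc, ih, Ne.symm hc]

theorem pvCount_singleton (s : List Char) (c : Char) :
    PySem.Chars.count s [c] = s.count c := by
  simp [PySem.Chars.count, pvCountGo]

-- PySem.Chars.find of a one-character needle points at its first occurrence
theorem pvFind_singleton (pre rest : List Char) (c : Char) (h : c ∉ pre) :
    PySem.Chars.find (pre ++ c :: rest) [c] = (pre.length : Int) := by
  have hmem : c ∈ pre ++ c :: rest := by simp
  have hnn : 0 ≤ PySem.Chars.find (pre ++ c :: rest) [c] := by
    rw [PySem.Chars.find_nonneg_iff, List.singleton_infix_iff]; exact hmem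
  obtain ⟨hpref, hmin⟩ := PySem.Chars.find_spec hnn
  set r := (PySem.Chars.find (pre ++ c :: rest) [c]).toNat with hr
  have hle : r ≤ pre.length := by
    by_contra hgt
    push Not at hgt
    exact hmin pre.length hgt (by simp [List.prefix_iff_eq_take])
  have hge : pre.length ≤ r := by
    by_contra hlt
    push Not at hlt
    have hd : (pre ++ c :: rest).drop r = pre.drop r ++ c :: rest := by
      rw [List.drop_append_of_le_length (le_of_lt hlt)]
    rw [hd] at hpref
    have hne : pre.drop r ≠ [] := by
      intro hnil
      have := List.drop_eq_nil_iff.mp hnil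
      omega
    obtain ⟨a, as, ha⟩ := List.exists_cons_of_ne_nil hne
    have hhead : (pre.drop r ++ c :: rest).head? = some c := by
      rcases hpref with ⟨t, ht⟩
      rw [← ht]; rfl
    rw [ha] at hhead
    simp at hhead
    subst hhead
    exact h (List.mem_of_mem_drop (by rw [ha]; exact List.mem_cons_self))
  omega

theorem pvDropWhile_head_false (p : Char → Bool) (l : List Char) (a : Char) (as : List Char)
    (h : l.dropWhile p = a :: as) : p a = false := by
  induction l with
  | nil => simp at h
  | cons x t ih =>
      rw [List.dropWhile_cons] at h
      by_cases hp : p x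
      · exact ih (by simpa [hp] using h)
      · simp [hp] at h
        obtain ⟨h1, h2⟩ := h
        subst h1
        simpa using hp

-- the canonical per-line value: the rolled segments emitted '#'-terminated, n segments
def pvEmit : Nat → List Char → List String
  | 0, _ => []
  | n + 1, s =>
    let pre := s.takeWhile (· ≠ '#')
    List.replicate (pre.count 'O') "O" ++ List.replicate (pre.length - pre.count 'O') "."
      ++ ["#"] ++ pvEmit n (s.drop (pre.length + 1))

theorem pvEmit_ne_nil (n : Nat) (s : List Char) : pvEmit (n + 1) s ≠ [] := by
  simp [pvEmit]

-- A's inner loop over one line, characterized against pvEmit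
theorem pvAloop (l : List Char) (xs : List Int) :
    ∀ (i0 : Nat) (acc : List String), i0 ≤ l.length → (l.drop i0).count '#' = xs.length →
    (xs.foldl
      (fun (st : Int × Int × List String) _ =>
        let i' := PySem.Chars.findFrom l ['#'] st.1 none + 1
        let smallRange := PySem.Chars.slice l (some st.2.1) (some i')
        let ohs := PySem.Chars.count smallRange ['O']
        (i', i',
          st.2.2 ++ List.replicate ohs "O"
                 ++ List.replicate (smallRange.length - ohs - 1) "." ++ ["#"]))
      ((i0 : Int), (i0 : Int), acc)).2.2
      = acc ++ pvEmit xs.length (l.drop i0) := by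
  induction xs with
  | nil => intro i0 acc _ _; simp [pvEmit]
  | cons x xs ih =>
      intro i0 acc hle hcnt
      set s := l.drop i0 with hs
      have hmem : '#' ∈ s := by
        have : 0 < s.count '#' := by rw [hcnt]; simp
        exact List.count_pos_iff.mp this
      set pre := s.takeWhile (· ≠ '#') with hpre
      have hnotin : '#' ∉ pre := by
        intro hm
        have := List.mem_takeWhile_imp hm
        simp at this
      have hdw : s.dropWhile (· ≠ '#') ≠ [] := by
        rw [Ne, List.dropWhile_eq_nil_iff]
        push Not
        exact ⟨'#', hmem, by simp⟩
      obtain ⟨a, as, ha⟩ := List.exists_cons_of_ne_nil hdw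
      have hahash : a = '#' := by
        have := pvDropWhile_head_false (fun c => decide (c ≠ '#')) s a as ha
        simpa using this
      subst hahash
      have hsdecomp : s = pre ++ '#' :: as := by
        conv_lhs => rw [← List.takeWhile_append_dropWhile (p := fun c => decide (c ≠ '#')) (l := s)]
        rw [ha]
      have hlen : s.length = pre.length + 1 + as.length := by rw [hsdecomp]; simp; omega
      have hslen : s.length = l.length - i0 := by rw [hs]; simp
      have hb2 : i0 + pre.length + 1 ≤ l.length := by omega
      have hfind : PySem.Chars.find s ['#'] = (pre.length : Int) := by
        rw [hsdecomp]; exact pvFind_singleton pre as '#' hnotin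
      have hff : PySem.Chars.findFrom l ['#'] (i0 : Int) none = ((i0 + pre.length : Nat) : Int) := by
        rw [PySem.Chars.findFrom_natCast l ['#'] i0 hle, ← hs, hfind]
        rw [if_neg (by omega)]
        push_cast
        ring
      have hslice : PySem.Chars.slice l (some (i0 : Int)) (some (((i0 + pre.length : Nat) : Int) + 1))
          = pre ++ ['#'] := by
        have h1 : (((i0 + pre.length : Nat) : Int) + 1) = (i0 : Int) + ((pre.length + 1 : Nat) : Int) := by
          push_cast; ring
        rw [PySem.Chars.slice_eq_listSlice, h1, PySem.List.slice_natCast_add, ← hs, hsdecomp]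
        rw [List.take_append]
        simp
      have hohs : PySem.Chars.count (pre ++ ['#']) ['O'] = pre.count 'O' := by
        rw [pvCount_singleton]
        simp [List.count_append]
      have hcount_le : pre.count 'O' ≤ pre.length := List.count_le_length
      have hdrop' : l.drop (i0 + pre.length + 1) = as := by
        have : l.drop (i0 + pre.length + 1) = s.drop (pre.length + 1) := by
          rw [hs, List.drop_drop]; ring_nf
        rw [this, hsdecomp]
        simp [List.drop_append]
      have hcnt' : (l.drop (i0 + pre.length + 1)).count '#' = xs.length := by
        rw [hdrop']
        have : s.count '#' = as.count '#' + 1 := by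
          rw [hsdecomp]; simp [List.count_append]
          have : pre.count '#' = 0 := List.count_eq_zero.mpr hnotin
          omega
        simp at hcnt
        omega
      simp only [List.foldl_cons, hff, hslice, hohs]
      have hlen1 : (pre ++ ['#']).length = pre.length + 1 := by simp
      rw [hlen1]
      have hsub : pre.length + 1 - pre.count 'O' - 1 = pre.length - pre.count 'O' := by omega
      rw [hsub]
      have hc1 : ((i0 + pre.length : Nat) : Int) + 1 = ((i0 + pre.length + 1 : Nat) : Int) := by
        push_cast; ring
      rw [hc1]
      rw [ih (i0 + pre.length + 1) _ hb2 hcnt']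
      have hemit : pvEmit (x :: xs).length s
          = List.replicate (pre.count 'O') "O" ++ List.replicate (pre.length - pre.count 'O') "."
            ++ ["#"] ++ pvEmit xs.length as := by
        show pvEmit (xs.length + 1) s = _
        rw [pvEmit, ← hpre]
        have : s.drop (pre.length + 1) = as := by rw [hsdecomp]; simp [List.drop_append]
        rw [this]
      rw [hdrop', hemit]
      simp [List.append_assoc]

-- B's inner loop, in named form (definitionally the lambda in rollStones_alt)
def pvBStep (st : List String × Nat × Nat) (ch : Char) : List String × Nat × Nat :=
  if ch = '#' then
    (st.1 ++ List.replicate st.2.1 "O" ++ List.replicate st.2.2 "." ++ ["#"], 0, 0)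
  else if ch = 'O' then (st.1, st.2.1 + 1, st.2.2)
  else (st.1, st.2.1, st.2.2 + 1)

def pvBFin (st : List String × Nat × Nat) : List String :=
  st.1 ++ List.replicate st.2.1 "O" ++ List.replicate st.2.2 "."

theorem pvBfold_free (pre : List Char) (h : '#' ∉ pre) :
    ∀ (out : List String) (o d : Nat),
    pre.foldl pvBStep (out, o, d)
      = (out, o + pre.count 'O', d + (pre.length - pre.count 'O')) := by
  induction pre with
  | nil => intro out o d; simp
  | cons c t ih =>
      intro out o d
      have hc : c ≠ '#' := by rintro rfl; exact h List.mem_cons_self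
      have ht : '#' ∉ t := fun hm => h (List.mem_cons_of_mem _ hm)
      have hcl : t.count 'O' ≤ t.length := List.count_le_length
      by_cases ho : c = 'O'
      · subst ho
        simp only [List.foldl_cons, pvBStep, if_neg hc, if_pos rfl, ih ht]
        simp [List.count_cons]
        omega
      · simp only [List.foldl_cons, pvBStep, if_neg hc, if_neg ho, ih ht]
        simp [List.count_cons, ho, Ne.symm ho]
        omega

theorem pvTakeWhile_all_append (pre rest : List Char) (h : '#' ∉ pre) :
    (pre ++ rest).takeWhile (· ≠ '#') = pre ++ rest.takeWhile (· ≠ '#') := by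
  have h1 : pre.takeWhile (fun c => decide (c ≠ '#')) = pre :=
    List.takeWhile_eq_self_iff.mpr (by
      intro a haa
      simp only [decide_eq_true_eq]
      rintro rfl
      exact h haa)
  rw [List.takeWhile_append, if_pos (by rw [h1])]

-- B's per-line value, characterized against the same pvEmit
theorem pvBridge (m : Nat) :
    ∀ (line : List Char) (out : List String), line.count '#' = m →
    pvBFin (line.foldl pvBStep (out, 0, 0))
      = out ++ (pvEmit (m + 1) (line ++ ['#'])).dropLast := by
  induction m with
  | zero =>
      intro line out hcnt
      have hnotin : '#' ∉ line := by
        intro hm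
        have := List.count_pos_iff.mpr hm
        omega
      have hpre : (line ++ ['#']).takeWhile (· ≠ '#') = line := by
        rw [pvTakeWhile_all_append line ['#'] hnotin]
        simp [List.takeWhile_cons]
      rw [pvBfold_free line hnotin out 0 0]
      show out ++ List.replicate (0 + line.count 'O') "O"
          ++ List.replicate (0 + (line.length - line.count 'O')) "." = _
      rw [pvEmit, hpre]
      simp only [pvEmit]
      simp [List.append_assoc]
  | succ m ih =>
      intro line out hcnt
      have hmem : '#' ∈ line := List.count_pos_iff.mp (by omega)
      set pre := line.takeWhile (· ≠ '#') with hpredef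
      have hnotin : '#' ∉ pre := by
        intro hm
        have := List.mem_takeWhile_imp hm
        simp at this
      have hdw : line.dropWhile (· ≠ '#') ≠ [] := by
        rw [Ne, List.dropWhile_eq_nil_iff]
        push Not
        exact ⟨'#', hmem, by simp⟩
      obtain ⟨a, as, ha⟩ := List.exists_cons_of_ne_nil hdw
      have hahash : a = '#' := by
        have := pvDropWhile_head_false (fun c => decide (c ≠ '#')) line a as ha
        simpa using this
      subst hahash
      have hdecomp : line = pre ++ '#' :: as := by
        conv_lhs => rw [← List.takeWhile_append_dropWhile (p := fun c => decide (c ≠ '#')) (l := line)]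
        rw [ha]
      have hcnt' : as.count '#' = m := by
        have : line.count '#' = as.count '#' + 1 := by
          rw [hdecomp]; simp [List.count_append]
          have : pre.count '#' = 0 := List.count_eq_zero.mpr hnotin
          omega
        omega
      rw [hdecomp, List.foldl_append, pvBfold_free pre hnotin out 0 0, List.foldl_cons]
      have hstep : pvBStep (out, 0 + pre.count 'O', 0 + (pre.length - pre.count 'O')) '#'
          = (out ++ List.replicate (0 + pre.count 'O') "O"
              ++ List.replicate (0 + (pre.length - pre.count 'O')) "." ++ ["#"], 0, 0) := by
        simp [pvBStep]
      rw [hstep, ih as _ hcnt']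
      have hpre2 : ((pre ++ '#' :: as) ++ ['#']).takeWhile (· ≠ '#') = pre := by
        rw [List.append_assoc, List.cons_append, pvTakeWhile_all_append pre ('#' :: (as ++ ['#'])) hnotin]
        simp
      have hdrop2 : ((pre ++ '#' :: as) ++ ['#']).drop (pre.length + 1) = as ++ ['#'] := by
        rw [List.append_assoc, List.cons_append]
        have h2 : pre ++ '#' :: (as ++ ['#']) = (pre ++ ['#']) ++ (as ++ ['#']) := by simp
        rw [h2]
        have h3 : pre.length + 1 = (pre ++ ['#']).length := by simp
        rw [h3, List.drop_left]
      conv_rhs => rw [pvEmit, hpre2, hdrop2]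
      rw [show List.replicate (pre.count 'O') "O" ++ List.replicate (pre.length - pre.count 'O') "."
            ++ ["#"] ++ pvEmit (m + 1) (as ++ ['#'])
          = (List.replicate (pre.count 'O') "O" ++ List.replicate (pre.length - pre.count 'O') "."
            ++ ["#"]) ++ pvEmit (m + 1) (as ++ ['#']) by simp]
      rw [List.dropLast_append_of_ne_nil (pvEmit_ne_nil m (as ++ ['#']))]
      simp [List.append_assoc]

-- one line: A's per-line value equals B's per-line value
theorem pvLine_eq (line : List Char) :
    PySem.List.slice
      (((PySem.List.pyRange 0 ((PySem.Chars.count (line ++ ['#']) ['#'] : Nat) : Int) 1).foldl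
        (fun (st : Int × Int × List String) _ =>
          let i' := PySem.Chars.findFrom (line ++ ['#']) ['#'] st.1 none + 1
          let smallRange := PySem.Chars.slice (line ++ ['#']) (some st.2.1) (some i')
          let ohs := PySem.Chars.count smallRange ['O']
          (i', i',
            st.2.2 ++ List.replicate ohs "O"
                   ++ List.replicate (smallRange.length - ohs - 1) "." ++ ["#"]))
        ((0 : Int), (0 : Int), ([] : List String))).2.2)
      none (some (-1))
    = pvBFin (line.foldl pvBStep ([], 0, 0)) := by
  have hy : PySem.Chars.count (line ++ ['#']) ['#'] = line.count '#' + 1 := by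
    rw [pvCount_singleton]
    simp [List.count_append]
  have hcnt0 : ((line ++ ['#']).drop 0).count '#'
      = (List.map (fun k : Nat => (k : Int)) (List.range (line.count '#' + 1))).length := by
    rw [List.drop_zero, List.length_map, List.length_range, List.count_append]
    simp
  have h1 := pvAloop (line ++ ['#'])
      (List.map (fun k : Nat => (k : Int)) (List.range (line.count '#' + 1))) 0 [] (by simp) hcnt0
  have h2 : PySem.List.slice
        ([] ++ pvEmit (List.map (fun k : Nat => (k : Int)) (List.range (line.count '#' + 1))).length
          ((line ++ ['#']).drop 0)) none (some (-1))
      = pvBFin (line.foldl pvBStep ([], 0, 0)) := by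
    rw [PySem.List.slice_to_neg_one, List.length_map, List.length_range, List.drop_zero,
      pvBridge (line.count '#') line [] rfl]
    simp
  rw [hy, PySem.List.pyRange_zero_natCast]
  exact (congrArg (fun v => PySem.List.slice v none (some (-1))) h1).trans h2

-- fold the per-line equality through the outer loops
set_option maxHeartbeats 1000000 in
theorem pvRollStones_eq (map : List String) : rollStones map = rollStones_alt map := by
  induction map using List.reverseRecOn with
  | nil => rfl
  | append_singleton xs x ih =>
      simp only [rollStones, rollStones_alt] at ih ⊢
      simp only [List.foldl_append, List.foldl_cons, List.foldl_nil]
      rw [ih]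
      exact congrArg (fun v => _ ++ [v]) (pvLine_eq x.toList)

-- ===== VERDICT (by name: the statement is the Claim_ definition above) =====
theorem rollStones_spec : Claim_equal_rollStones := by
  intro map _
  show rollStones map = rollStones_alt map
  exact pvRollStones_eq map
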